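-- pv_equiv track=rewrite | github.com/alexeydemin/faang_tasks | hackerrank/investors.py | countMeetings
-- ===== SOURCE A (Python) =====
-- def countMeetings(arrival, departure):
--     _min = min(arrival)
--     _max = max(departure)
--     per = []
--     r = 0
--     for k, a in enumerate(arrival):
--         per.append((arrival[k], departure[k]))
--     for i in range(_min, _max+1):
--         for j, t in enumerate(per):
--             if t[0] <= i <= t[1]:
--                 r+=1
--                 del(per[j])
--                 break
--     return r
-- ===== SOURCE B (Python) =====
-- def countMeetings(arrival, departure):
--     # Event-driven sweep: same greedy (each time point serves the lowest-index
--     # pending interval containing it), but empty time stretches are skipped by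
--     # jumping straight to the next arrival instead of scanning every time point.
--     _max = max(departure)
--     per = [(arrival[k], departure[k]) for k in range(len(arrival))]
--     t = min(arrival)
--     r = 0
--     while t <= _max:
--         j = next((j for j, (a, d) in enumerate(per) if a <= t <= d), None)
--         if j is not None:
--             del per[j]
--             r += 1
--             t += 1
--         else:
--             future = [a for a, d in per if a > t]
--             if not future:
--                 break
--             t = min(future)
--     return r
-- ===== Notes on version B (the rewrite author's own statement) =====
-- stated objective: faster
-- what changed: Replaces A's scan of every time point from min(arrival) to max(departure) by an event-driven sweep that serves one pending interval per step and, when no interval is active, jumps directly to the next future arrival (or stops), so the running time no longer depends on the width of the time range.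
import Mathlib
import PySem

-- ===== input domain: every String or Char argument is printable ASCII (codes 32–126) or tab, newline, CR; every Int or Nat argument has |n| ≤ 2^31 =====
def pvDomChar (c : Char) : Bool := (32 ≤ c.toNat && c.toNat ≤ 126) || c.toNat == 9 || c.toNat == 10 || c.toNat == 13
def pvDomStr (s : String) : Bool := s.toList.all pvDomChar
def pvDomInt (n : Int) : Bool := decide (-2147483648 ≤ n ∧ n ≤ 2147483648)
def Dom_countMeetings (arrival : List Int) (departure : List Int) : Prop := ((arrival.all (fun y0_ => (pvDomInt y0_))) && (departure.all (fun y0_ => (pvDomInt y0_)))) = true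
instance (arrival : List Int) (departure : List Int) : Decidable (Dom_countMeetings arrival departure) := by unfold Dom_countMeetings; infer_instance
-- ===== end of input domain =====

-- B replaces A's scan of every time point between min(arrival) and max(departure) by an
-- event-driven sweep that jumps over time stretches with no active interval (faster when
-- the time range is wide). Equivalence of the return values is proved on Pre_ below.


-- ===== PORT A =====
-- inner 'for j, t in enumerate(per): if t[0] <= i <= t[1]: del per[j]; break':
-- returns the list with the first active interval removed, or none if no interval is active
def innerA (i : Int) : List (Int × Int) → Option (List (Int × Int))
  | [] => none
  | t :: rest =>
    if t.1 ≤ i ∧ i ≤ t.2 then some rest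
    else match innerA i rest with
      | some rest' => some (t :: rest')
      | none => none

-- one iteration of A's outer time loop: state is (per, r)
def stepA (st : List (Int × Int) × Int) (i : Int) : List (Int × Int) × Int :=
  match innerA i st.1 with
  | some per' => (per', st.2 + 1)
  | none => st

def countMeetings (arrival : List Int) (departure : List Int) : Int :=
  match PySem.List.min? arrival (fun x => x), PySem.List.max? departure (fun x => x) with
  | some mn, some mx =>
    -- 'for k, a in enumerate(arrival): per.append((arrival[k], departure[k]))'
    let per := (PySem.List.enumerate arrival).foldl
      (fun acc ka => acc ++ [(PySem.List.pyGetD arrival ka.1 0, PySem.List.pyGetD departure ka.1 0)]) []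
    ((PySem.List.pyRange mn (mx + 1) 1).foldl stepA (per, 0)).2
  | _, _ => 0   -- min()/max() of an empty list raises in Python: outside Pre_

-- ===== PORT B =====
-- termination helper for bLoop's jump branch (cited by name in decreasing_by)
theorem bLoop_jump_dec (per : List (Int × Int)) (t t' : Int)
    (hm : PySem.List.min? ((per.filter (fun p => decide (t < p.1))).map Prod.fst) (fun x => x) = some t') :
    (per.filter (fun p => decide (t' < p.1))).length < (per.filter (fun p => decide (t < p.1))).length := by
  have hmem := PySem.List.min?_mem hm
  have hmin := PySem.List.min?_isMin hm
  obtain ⟨q, hq, hq1⟩ := List.mem_map.mp hmem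
  have hqmem := List.mem_filter.mp hq
  have htt' : t < t' := by have := hqmem.2; simp at this; omega
  have hsub : per.filter (fun p => decide (t' < p.1)) =
      (per.filter (fun p => decide (t < p.1))).filter (fun p => decide (t' < p.1)) := by
    rw [List.filter_filter]
    apply List.filter_congr
    intro p _
    by_cases h : t' < p.1
    · simp [h, show t < p.1 by omega]
    · simp [h]
  rw [hsub]
  exact List.length_filter_lt_length_iff_exists.mpr ⟨q, hq, by simp [hq1]⟩

def bLoop (mx : Int) (per : List (Int × Int)) (t : Int) (r : Int) : Int :=
  if t ≤ mx then
    match hf : per.findIdx? (fun p => decide (p.1 ≤ t ∧ t ≤ p.2)) with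
    | some j => bLoop mx (per.eraseIdx j) (t + 1) (r + 1)
    | none =>
      match hm : PySem.List.min? ((per.filter (fun p => decide (t < p.1))).map Prod.fst) (fun x => x) with
      | some t' => bLoop mx per t' r
      | none => r   -- hm is cited by the decreasing_by proof below
  else r
termination_by (per.length, (per.filter (fun p => decide (t < p.1))).length)
decreasing_by
  · left
    have := List.findIdx?_eq_some_iff_findIdx_eq.mp hf
    have hj : j < per.length := by omega
    rw [List.length_eraseIdx_of_lt hj]; omega
  · right
    exact bLoop_jump_dec per t t' hm

def countMeetings_alt (arrival : List Int) (departure : List Int) : Int :=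
  match PySem.List.max? departure (fun x => x) with
  | none => 0   -- max() of an empty list raises in Python: outside Pre_
  | some mx =>
    -- 'per = [(arrival[k], departure[k]) for k in range(len(arrival))]'
    let per := (List.range arrival.length).map (fun k => (arrival.getD k 0, departure.getD k 0))
    match PySem.List.min? arrival (fun x => x) with
    | none => 0   -- min() of an empty list raises in Python: outside Pre_
    | some mn => bLoop mx per mn 0

-- ===== PRECONDITION & SPEC =====
-- Pre_ excludes exactly the inputs on which A raises: min() of an empty arrival
-- (ValueError) and departure shorter than arrival (IndexError on departure[k]).
def Pre_countMeetings (arrival : List Int) (departure : List Int) : Prop :=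
  arrival ≠ [] ∧ arrival.length ≤ departure.length
instance (arrival : List Int) (departure : List Int) : Decidable (Pre_countMeetings arrival departure) := by unfold Pre_countMeetings; infer_instance

def pvWitness_countMeetings : List Int × List Int := ([1, 3], [2, 4])

def Spec_countMeetings (arrival : List Int) (departure : List Int) (out : Int) : Prop := out = countMeetings_alt arrival departure
instance (arrival : List Int) (departure : List Int) (out : Int) : Decidable (Spec_countMeetings arrival departure out) := by unfold Spec_countMeetings; infer_instance

-- ===== CLAIM (what is proved, stated in full; the proofs are below) =====
def Claim_equal_countMeetings : Prop := ∀ (arrival : List Int) (departure : List Int), Dom_countMeetings arrival departure → Pre_countMeetings arrival departure → Spec_countMeetings arrival departure (countMeetings arrival departure)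

-- ===== LEMMAS AND PROOFS =====

-- A's inner loop is: find the first active interval, erase it
theorem innerA_eq (i : Int) (per : List (Int × Int)) :
    innerA i per = (per.findIdx? (fun p => decide (p.1 ≤ i ∧ i ≤ p.2))).map per.eraseIdx := by
  induction per with
  | nil => simp [innerA]
  | cons x xs ih =>
    rw [List.findIdx?_cons]
    by_cases h : x.1 ≤ i ∧ i ≤ x.2
    · simp [innerA, h]
    · simp only [innerA, ih, decide_eq_true_eq, h, if_false]
      cases List.findIdx? (fun p => decide (p.1 ≤ i ∧ i ≤ p.2)) xs <;>
        simp [List.eraseIdx_cons_succ]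

theorem stepA_some {i : Int} {per : List (Int × Int)} {r : Int} {j : Nat}
    (hf : per.findIdx? (fun p => decide (p.1 ≤ i ∧ i ≤ p.2)) = some j) :
    stepA (per, r) i = (per.eraseIdx j, r + 1) := by
  simp only [stepA, innerA_eq, hf, Option.map_some]

theorem stepA_none {i : Int} {per : List (Int × Int)} {r : Int}
    (hf : per.findIdx? (fun p => decide (p.1 ≤ i ∧ i ≤ p.2)) = none) :
    stepA (per, r) i = (per, r) := by
  simp only [stepA, innerA_eq, hf, Option.map_none]

-- time points at which no interval is active are no-ops for A's loop
theorem foldl_noop (ts : List Int) (per : List (Int × Int)) (r : Int)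
    (h : ∀ s ∈ ts, ∀ p ∈ per, ¬(p.1 ≤ s ∧ s ≤ p.2)) :
    ts.foldl stepA (per, r) = (per, r) := by
  induction ts with
  | nil => rfl
  | cons s ts ih =>
    have hnone : per.findIdx? (fun p => decide (p.1 ≤ s ∧ s ≤ p.2)) = none := by
      rw [List.findIdx?_eq_none_iff]
      intro p hp
      simpa using h s (by simp) p hp
    rw [List.foldl_cons, stepA_none hnone]
    exact ih (fun s' hs' p hp => h s' (by simp [hs']) p hp)

-- main invariant: A's remaining time loop computes exactly bLoop
theorem main_eq (mx : Int) (per : List (Int × Int)) (t r : Int) :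
    (∀ p ∈ per, p.2 ≤ mx) →
    ((PySem.List.pyRange t (mx + 1) 1).foldl stepA (per, r)).2 = bLoop mx per t r := by
  induction per, t, r using bLoop.induct mx with
  | case1 per t r htm j hf ih =>
    intro hd
    rw [bLoop, if_pos htm]
    split
    next j' heq =>
      rw [hf] at heq
      injection heq with h'
      subst h'
      rw [PySem.List.pyRange_one_cons (by omega), List.foldl_cons, stepA_some hf]
      exact ih (fun p hp => hd p (List.mem_of_mem_eraseIdx hp))
    next heq => rw [hf] at heq; cases heq
  | case2 per t r htm hf t' hm ih =>
    intro hd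
    rw [bLoop, if_pos htm]
    split
    next j' heq => rw [hf] at heq; cases heq
    next _ =>
      split
      next t'' heq =>
        rw [hm] at heq
        injection heq with h'
        subst h'
        rw [← ih hd]
        have hnoact : ∀ p ∈ per, ¬(p.1 ≤ t ∧ t ≤ p.2) := by
          intro p hp
          have := List.findIdx?_eq_none_iff.mp hf p hp
          simpa using this
        have hmin := PySem.List.min?_isMin hm
        have hmem := PySem.List.min?_mem hm
        obtain ⟨q, hq, hq1⟩ := List.mem_map.mp hmem
        have hqf := List.mem_filter.mp hq
        have htt' : t < t' := by have := hqf.2; simp at this; omega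
        have hgap : ∀ s, t ≤ s → s < t' → ∀ p ∈ per, ¬(p.1 ≤ s ∧ s ≤ p.2) := by
          intro s hs1 hs2 p hp
          by_cases hpa : t < p.1
          · have : t' ≤ p.1 :=
              hmin p.1 (List.mem_map.mpr ⟨p, List.mem_filter.mpr ⟨hp, by simpa⟩, rfl⟩)
            omega
          · have := hnoact p hp; omega
        by_cases hcase : t' ≤ mx + 1
        · rw [PySem.List.pyRange_one_append t t' (mx + 1) (by omega) hcase, List.foldl_append,
            foldl_noop _ per r (fun s hs p hp => by
              have := PySem.List.mem_pyRange_one.mp hs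
              exact hgap s this.1 this.2 p hp)]
        · rw [foldl_noop _ per r (fun s hs p hp => by
              have := PySem.List.mem_pyRange_one.mp hs
              exact hgap s this.1 (by omega) p hp),
            PySem.List.pyRange_one_eq_nil (by omega),
            foldl_noop _ per r (fun s hs p hp => by simp at hs)]
      next heq => rw [hm] at heq; cases heq
  | case3 per t r htm hf hm =>
    intro hd
    rw [bLoop, if_pos htm]
    split
    next j' heq => rw [hf] at heq; cases heq
    next _ =>
      split
      next t'' heq => rw [hm] at heq; cases heq
      next _ =>
        have hnof : per.filter (fun p => decide (t < p.1)) = [] := by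
          have := (PySem.List.min?_eq_none_iff _ _).mp hm
          exact List.map_eq_nil_iff.mp this
        have hnoact : ∀ p ∈ per, ¬(p.1 ≤ t ∧ t ≤ p.2) := by
          intro p hp
          have := List.findIdx?_eq_none_iff.mp hf p hp
          simpa using this
        have hall : ∀ p ∈ per, p.2 < t := by
          intro p hp
          have h1 : ¬ (t < p.1) := by
            intro hlt
            have : p ∈ per.filter (fun p => decide (t < p.1)) :=
              List.mem_filter.mpr ⟨hp, by simpa⟩
            simp [hnof] at this
          have := hnoact p hp; omega
        rw [foldl_noop _ per r (fun s hs p hp => by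
          have := PySem.List.mem_pyRange_one.mp hs
          have := hall p hp
          omega)]
  | case4 per t r htm =>
    intro hd
    rw [bLoop, if_neg htm, PySem.List.pyRange_one_eq_nil (by omega)]
    rfl

-- the two builds of 'per' coincide
theorem per_builds_eq (arrival departure : List Int) :
    (PySem.List.enumerate arrival).foldl
      (fun acc ka => acc ++ [(PySem.List.pyGetD arrival ka.1 0, PySem.List.pyGetD departure ka.1 0)]) []
    = (List.range arrival.length).map (fun k => (arrival.getD k 0, departure.getD k 0)) := by
  refine Eq.trans (PySem.List.foldl_append_singleton_eq_map
      (fun ka => (PySem.List.pyGetD arrival ka.1 0, PySem.List.pyGetD departure ka.1 0))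
      (PySem.List.enumerate arrival) []) ?_
  have h1 : (PySem.List.enumerate arrival).map
        (fun ka => (PySem.List.pyGetD arrival ka.1 0, PySem.List.pyGetD departure ka.1 0))
      = ((PySem.List.enumerate arrival).map (fun x => x.1)).map
        (fun k => (PySem.List.pyGetD arrival k 0, PySem.List.pyGetD departure k 0)) := by
    rw [List.map_map]; rfl
  rw [List.nil_append, h1, PySem.List.map_fst_enumerate, zero_add, PySem.List.pyRange_zero_nat,
    List.map_map]
  apply List.map_congr_left
  intro k _
  simp [PySem.List.pyGetD_natCast]

theorem countMeetings_spec' (arrival departure : List Int)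
    (hpre : Pre_countMeetings arrival departure) :
    countMeetings arrival departure = countMeetings_alt arrival departure := by
  obtain ⟨hne, hlen⟩ := hpre
  have hdne : departure ≠ [] := by
    intro h; subst h
    cases arrival with
    | nil => exact hne rfl
    | cons a l => simp at hlen
  obtain ⟨mn, hmn⟩ : ∃ mn, PySem.List.min? arrival (fun x => x) = some mn := by
    cases h : PySem.List.min? arrival (fun x => x) with
    | none => exact absurd ((PySem.List.min?_eq_none_iff _ _).mp h) hne
    | some m => exact ⟨m, rfl⟩
  obtain ⟨mx, hmx⟩ : ∃ mx, PySem.List.max? departure (fun x => x) = some mx := by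
    cases h : PySem.List.max? departure (fun x => x) with
    | none => exact absurd ((PySem.List.max?_eq_none_iff _ _).mp h) hdne
    | some m => exact ⟨m, rfl⟩
  unfold countMeetings countMeetings_alt
  rw [hmn, hmx]
  simp only [per_builds_eq]
  apply main_eq
  intro p hp
  obtain ⟨k, hk, hkp⟩ := List.mem_map.mp hp
  have hk' : k < arrival.length := List.mem_range.mp hk
  have hk2 : k < departure.length := by omega
  have : p.2 = departure[k] := by rw [← hkp]; simp [List.getD, List.getElem?_eq_getElem hk2]
  rw [this]
  exact PySem.List.max?_isMax hmx _ (List.getElem_mem hk2)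

-- ===== VERDICT (by name: the statement is the Claim_ definition above) =====
theorem countMeetings_spec : Claim_equal_countMeetings := by
  intro arrival departure _ hpre
  unfold Spec_countMeetings
  exact countMeetings_spec' arrival departure hpre
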